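-- pv_equiv track=rewrite | github.com/AnnaGrBio/DESWOMAN | deswoman_src/module_global_alignment_properties.py | look_ATG_frameshift
-- ===== SOURCE A (Python) =====
-- def look_ATG_frameshift(denovo : str, nchit : str) -> (str, int):
--     """
--     This function checks if an ATG start codon is present within the first 20 nucleotides of a given aligned homolog sequence.
--
--     The function scans the first 20 nucleotides (or the length of the sequence, whichever is shorter) of the alignment to see if
--     any 3 consecutive nucleotides form the start codon 'ATG'. If an 'ATG' is found, the function updates the status to 'S'
--     (indicating the presence of an ATG) and returns the position of the first occurrence of the 'ATG' codon.
--
--     If no 'ATG' is found within the first 20 nucleotides, the function returns the default status 'A' (absence of ATG) and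
--     the position is set to -20, indicating that no valid start codon was detected.
--
--     Parameters:
--     -----------
--     denovo : str
--         An identifier or name for the denovo gene or sequence being analyzed (not used in the logic but may be for tracking).
--
--     nchit : str
--         The aligned nucleotide sequence (as a string), where '-' represents gaps in the alignment and other characters represent
--         the actual nucleotides.
--
--     Returns:
--     --------
--     tuple
--         A tuple with two elements:
--         - presence_atg (str): 'S' if an ATG start codon is found within the first 20 nucleotides, 'A' if not.
--         - pos_ATG_in_ali (int): The position of the first 'ATG' codon in the sequence (0-based index), or -20 if no ATG is found.
--     """
--     presence_atg = "A"
--     compteur_nucl = -1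
--     pos_ATG_in_ali = -20
--     for compteur_pos in range(0,len(nchit)):
--         if nchit[compteur_pos] != "-":
--             compteur_nucl += 1
--             nucl = ""
--             nucl += nchit[compteur_pos].upper()
--             # Look for Start
--             if nucl == "A":
--                 for compteur_pos_next in range(compteur_pos + 1,len(nchit)):
--                     if nchit[compteur_pos_next] != "-":
--                         nucl += nchit[compteur_pos_next].upper()
--                     if len(nucl) == 3:
--                         if nucl == "ATG":
--                             pos_ATG_in_ali = compteur_pos
--                             presence_atg = "S"
--                         break
--             if presence_atg == "S" or compteur_nucl > 20:
--                 break
--     return presence_atg, pos_ATG_in_ali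
-- ===== SOURCE B (Python) =====
-- def look_ATG_frameshift(denovo : str, nchit : str) -> (str, int):
--     # Compact the alignment into (original_index, uppercase_nucleotide) pairs, then flat-scan triples.
--     comp = [(i, c.upper()) for i, c in enumerate(nchit) if c != "-"]
--     for k in range(min(len(comp), 22)):
--         if k + 2 < len(comp) and comp[k][1] == "A" and comp[k + 1][1] == "T" and comp[k + 2][1] == "G":
--             return "S", comp[k][0]
--     return "A", -20
-- ===== Notes on version B (the rewrite author's own statement) =====
-- stated objective: simpler
-- what changed: Replaces the nested gap-skipping look-ahead loop and mutable status flags with a one-shot compaction into (alignment_index, uppercased_nucleotide) pairs followed by a flat scan of consecutive triples over the first 22 compacted positions.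
import Mathlib
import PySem

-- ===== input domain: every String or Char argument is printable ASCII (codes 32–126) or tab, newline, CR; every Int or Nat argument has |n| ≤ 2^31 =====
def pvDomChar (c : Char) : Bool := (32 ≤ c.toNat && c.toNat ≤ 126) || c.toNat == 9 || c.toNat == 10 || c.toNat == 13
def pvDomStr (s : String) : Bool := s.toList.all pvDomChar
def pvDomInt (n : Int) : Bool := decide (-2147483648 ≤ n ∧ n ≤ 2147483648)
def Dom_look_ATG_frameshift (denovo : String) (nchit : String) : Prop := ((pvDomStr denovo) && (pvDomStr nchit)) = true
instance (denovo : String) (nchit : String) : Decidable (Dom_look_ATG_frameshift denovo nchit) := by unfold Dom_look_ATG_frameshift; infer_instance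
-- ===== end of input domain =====

-- B replaces A's nested gap-skipping look-ahead with a one-shot compaction of the alignment into
-- (index, uppercased nucleotide) pairs followed by a flat triple scan — simpler decomposition.

-- ===== PORT A =====
-- inner loop: for compteur_pos_next …: if non-gap, append uppercased char; break once len(nucl) == 3
def pvAInner (rest : List Char) (nucl : List Char) : List Char :=
  match rest with
  | [] => nucl
  | c :: t =>
    let nucl' := if c ≠ '-' then nucl ++ [PySem.Chars.upperChar c] else nucl
    if nucl'.length = 3 then nucl' else pvAInner t nucl'

-- outer loop over positions; i = compteur_pos, cnt = compteur_nucl; `break` = returning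
def pvAOuter (rest : List Char) (i : Int) (cnt : Int) : String × Int :=
  match rest with
  | [] => ("A", -20)
  | c :: t =>
    if c ≠ '-' then
      let cnt' := cnt + 1
      let nucl := [PySem.Chars.upperChar c]
      let res : String × Int :=
        if nucl = ['A'] then
          let n3 := pvAInner t nucl
          if n3 = ['A', 'T', 'G'] then ("S", i) else ("A", -20)
        else ("A", -20)
      if res.1 = "S" then res
      else if cnt' > 20 then ("A", -20)
      else pvAOuter t (i + 1) cnt'
    else pvAOuter t (i + 1) cnt

def look_ATG_frameshift (denovo : String) (nchit : String) : String × Int :=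
  pvAOuter nchit.toList 0 (-1)

-- ===== PORT B =====
-- comp = [(i, c.upper()) for i, c in enumerate(nchit) if c != '-']
def pvCompact (i : Int) (l : List Char) : List (Int × Char) :=
  match l with
  | [] => []
  | c :: t => if c ≠ '-' then (i, PySem.Chars.upperChar c) :: pvCompact (i + 1) t
              else pvCompact (i + 1) t

-- comp[k][1]=='A' and comp[k+1][1]=='T' and comp[k+2][1]=='G' (existence of k+1, k+2 included)
def pvTriple (c1 : Char) (rest : List (Int × Char)) : Bool :=
  c1 == 'A' && (match rest with
                | (_, c2) :: (_, c3) :: _ => c2 == 'T' && c3 == 'G'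
                | _ => false)

-- the flat scan: fuel = number of start positions still allowed (min(len(comp), 22) in Python)
def pvBScan (fuel : Nat) (xs : List (Int × Char)) : String × Int :=
  match fuel, xs with
  | 0, _ => ("A", -20)
  | _ + 1, [] => ("A", -20)
  | m + 1, (i, c1) :: rest =>
    if pvTriple c1 rest then ("S", i) else pvBScan m rest

def look_ATG_frameshift_alt (denovo : String) (nchit : String) : String × Int :=
  pvBScan 22 (pvCompact 0 nchit.toList)

-- ===== PRECONDITION & SPEC =====
def Spec_look_ATG_frameshift (denovo : String) (nchit : String) (out : String × Int) : Prop := out = look_ATG_frameshift_alt denovo nchit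
instance (denovo : String) (nchit : String) (out : String × Int) : Decidable (Spec_look_ATG_frameshift denovo nchit out) := by unfold Spec_look_ATG_frameshift; infer_instance

-- ===== CLAIM (what is proved, stated in full; the proofs are below) =====
def Claim_equal_look_ATG_frameshift : Prop := ∀ (denovo : String) (nchit : String), Dom_look_ATG_frameshift denovo nchit → Spec_look_ATG_frameshift denovo nchit (look_ATG_frameshift denovo nchit)

-- ===== LEMMAS AND PROOFS =====

-- uppercased non-gap characters of the tail
def pvUp (l : List Char) : List Char := (l.filter (· ≠ '-')).map PySem.Chars.upperChar

theorem pvCompact_snd (i : Int) (l : List Char) :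
    (pvCompact i l).map Prod.snd = pvUp l := by
  induction l generalizing i with
  | nil => rfl
  | cons c t ih =>
    by_cases h : c = '-' <;> simp [pvCompact, pvUp, List.filter, h] at * <;>
      simpa [pvUp] using ih (i + 1)

theorem pvAInner_two (t : List Char) (a b : Char) :
    pvAInner t [a, b] = [a, b] ++ (pvUp t).take 1 := by
  induction t with
  | nil => rfl
  | cons c t ih =>
    by_cases h : c = '-'
    · simpa [pvAInner, pvUp, List.filter, h] using ih
    · simp [pvAInner, pvUp, List.filter, h]

theorem pvAInner_one (t : List Char) (a : Char) :
    pvAInner t [a] = [a] ++ (pvUp t).take 2 := by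
  induction t with
  | nil => rfl
  | cons c t ih =>
    by_cases h : c = '-'
    · simpa [pvAInner, pvUp, List.filter, h] using ih
    · simp [pvAInner, pvUp, List.filter, h, pvAInner_two]

theorem pvTriple_iff (c1 : Char) (rest : List (Int × Char)) :
    pvTriple c1 rest = true ↔ (c1 = 'A' ∧ (rest.map Prod.snd).take 2 = ['T', 'G']) := by
  rcases rest with _ | ⟨⟨x, c2⟩, _ | ⟨⟨y, c3⟩, rr⟩⟩ <;> simp [pvTriple]

theorem pvMain (l : List Char) (i : Int) (n : Nat) (hn : 1 ≤ n) :
    pvAOuter l i (21 - (n : Int)) = pvBScan n (pvCompact i l) := by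
  induction l generalizing i n with
  | nil =>
    obtain ⟨m, rfl⟩ : ∃ m, n = m + 1 := ⟨n - 1, by omega⟩
    rfl
  | cons c t ih =>
    obtain ⟨m, rfl⟩ : ∃ m, n = m + 1 := ⟨n - 1, by omega⟩
    by_cases h : c = '-'
    · simpa [pvAOuter, pvCompact, h] using ih (i + 1) (m + 1) hn
    · -- non-gap head
      have hcnt : (21 : Int) - ((m + 1 : Nat) : Int) + 1 = 21 - (m : Int) := by push_cast; ring
      have htail : (pvCompact (i + 1) t).map Prod.snd = pvUp t := pvCompact_snd (i + 1) t
      rw [show pvCompact i (c :: t) = (i, PySem.Chars.upperChar c) :: pvCompact (i + 1) t by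
        simp [pvCompact, h]]
      by_cases hA : PySem.Chars.upperChar c = 'A'
      · by_cases hTG : (pvUp t).take 2 = ['T', 'G']
        · -- match: both sides return ("S", i)
          have hn3 : pvAInner t ['A'] = ['A', 'T', 'G'] := by
            rw [← hA, pvAInner_one, hA, hTG]; rfl
          have hB : pvTriple (PySem.Chars.upperChar c) (pvCompact (i + 1) t) = true := by
            rw [pvTriple_iff, htail]; exact ⟨hA, hTG⟩
          rw [hA] at hB
          simp [pvAOuter, pvBScan, h, hA, hn3, hB]
        · -- head is 'A' but no TG after: no match at this position
          have hn3 : pvAInner t ['A'] ≠ ['A', 'T', 'G'] := by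
            rw [← hA, pvAInner_one, hA]; intro he
            exact hTG (by injection he)
          have hB : pvTriple (PySem.Chars.upperChar c) (pvCompact (i + 1) t) = false := by
            rw [Bool.eq_false_iff, Ne, pvTriple_iff, htail]
            rintro ⟨-, h2⟩; exact hTG h2
          rw [hA] at hB
          rcases Nat.eq_zero_or_pos m with hm | hm
          · subst hm
            simp [pvAOuter, pvBScan, h, hA, hn3, hB]
          · have hrec := ih (i + 1) m hm
            simp only [pvAOuter, pvBScan, h, hA, hn3, hB, ite_true, ite_false,
              if_neg hn3, Bool.false_eq_true]
            rw [if_neg (by decide : ¬ (("A", -20) : String × Int).1 = "S"),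
              if_neg (by push_cast; omega : ¬ (21 : Int) - ((m + 1 : Nat) : Int) + 1 > 20),
              hcnt, hrec]
            simp [h]
      · -- head is not 'A'
        have hB : pvTriple (PySem.Chars.upperChar c) (pvCompact (i + 1) t) = false := by
          rw [Bool.eq_false_iff, Ne, pvTriple_iff]
          rintro ⟨h1, -⟩; exact hA h1
        have hA' : ¬ ([PySem.Chars.upperChar c] = (['A'] : List Char)) := by simpa using hA
        rcases Nat.eq_zero_or_pos m with hm | hm
        · subst hm
          simp [pvAOuter, pvBScan, h, hA', hB]
        · have hrec := ih (i + 1) m hm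
          simp only [pvAOuter, pvBScan, h, hB, if_neg hA', ite_true, ite_false,
            Bool.false_eq_true]
          rw [if_neg (by decide : ¬ (("A", -20) : String × Int).1 = "S"),
            if_neg (by push_cast; omega : ¬ (21 : Int) - ((m + 1 : Nat) : Int) + 1 > 20),
            hcnt, hrec]
          simp [h]

-- ===== VERDICT (by name: the statement is the Claim_ definition above) =====
theorem look_ATG_frameshift_spec : Claim_equal_look_ATG_frameshift := by
  intro denovo nchit _
  unfold Spec_look_ATG_frameshift look_ATG_frameshift look_ATG_frameshift_alt
  simpa using pvMain nchit.toList 0 22 (by omega)
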